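-- pv_equiv track=rewrite | github.com/cyanling2/makeup_seg | makeup.py | find_top2_clusters
-- ===== SOURCE A (Python) =====
-- def find_top2_clusters(clusters):
--     """
--     :INPUT: clustering.labels_
--     :OUTPUT: tuple of two lists, each contain a cluster
--     :
--     """
--     dic={}
--     for i, num in enumerate(clusters):
--         if num == -1:
--             continue
--         if num in dic.keys():
--             dic[num].append(i)
--         else:
--             dic[num] = [i]
--     sorted_dic = sorted(dic.items(), key=lambda x: len(x[1]), reverse=True)
--     return sorted_dic[0][1], sorted_dic[1][1]
-- ===== SOURCE B (Python) =====
-- def find_top2_clusters(clusters):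
--     dic = {}
--     for i, num in enumerate(clusters):
--         if num != -1:
--             dic.setdefault(num, []).append(i)
--     top = []  # at most two (label, members) pairs, sizes non-increasing, ties first-seen
--     for item in dic.items():
--         if not top:
--             top = [item]
--         elif len(item[1]) > len(top[0][1]):
--             top = [item, top[0]]
--         elif len(top) == 1:
--             top.append(item)
--         elif len(item[1]) > len(top[1][1]):
--             top[1] = item
--     return top[0][1], top[1][1]
-- ===== Notes on version B (the rewrite author's own statement) =====
-- stated objective: simpler
-- what changed: Replaces sorting all cluster groups by size with a single linear scan over the grouped dict that maintains the two largest clusters (strict comparisons preserve the stable sort's first-seen tie-breaking).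
import Mathlib
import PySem

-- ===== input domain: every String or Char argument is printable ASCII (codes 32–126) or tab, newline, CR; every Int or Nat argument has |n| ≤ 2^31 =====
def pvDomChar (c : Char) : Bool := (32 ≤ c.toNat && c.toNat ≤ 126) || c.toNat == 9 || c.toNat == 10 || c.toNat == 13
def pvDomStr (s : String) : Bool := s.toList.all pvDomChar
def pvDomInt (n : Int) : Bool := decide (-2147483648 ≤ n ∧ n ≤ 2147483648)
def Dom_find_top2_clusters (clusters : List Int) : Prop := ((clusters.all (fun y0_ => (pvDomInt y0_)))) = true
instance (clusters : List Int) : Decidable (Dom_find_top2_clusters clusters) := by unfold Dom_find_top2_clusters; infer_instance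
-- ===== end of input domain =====

-- B replaces A's sort-then-index by a single linear scan keeping the two largest clusters (simpler top-2 selection; grouping loop kept).

-- ===== PORT A =====
def pvA_dic (clusters : List Int) : PySem.Dict Int (List Int) :=
  (PySem.List.enumerate clusters 0).foldl (fun d p =>
    if p.2 == -1 then d
    else if d.contains p.2 then d.modify p.2 [] (fun l => l ++ [p.1])
    else d.insert p.2 [p.1]) PySem.Dict.empty

def find_top2_clusters (clusters : List Int) : List Int × List Int :=
  let sorted_dic := PySem.List.sorted (pvA_dic clusters).items (fun x => x.2.length) true
  (((PySem.List.pyGet? sorted_dic 0).getD (0, [])).2,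
   ((PySem.List.pyGet? sorted_dic 1).getD (0, [])).2)

-- ===== PORT B =====
def pvB_groups (clusters : List Int) : PySem.Dict Int (List Int) :=
  (PySem.List.enumerate clusters 0).foldl (fun d p =>
    if p.2 != -1 then (d.setdefault p.2 []).modify p.2 [] (fun l => l ++ [p.1])
    else d) PySem.Dict.empty

def pvB_step (top : List (Int × List Int)) (item : Int × List Int) : List (Int × List Int) :=
  match top with
  | [] => [item]
  | [a] => if item.2.length > a.2.length then [item, a] else [a, item]
  | a :: b :: t =>
      if item.2.length > a.2.length then [item, a]
      else if item.2.length > b.2.length then [a, item]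
      else a :: b :: t

def find_top2_clusters_alt (clusters : List Int) : List Int × List Int :=
  let top := (pvB_groups clusters).items.foldl pvB_step []
  (((PySem.List.pyGet? top 0).getD (0, [])).2,
   ((PySem.List.pyGet? top 1).getD (0, [])).2)

-- ===== PRECONDITION & SPEC =====
-- Pre_ excludes inputs with fewer than two distinct cluster labels ≠ -1, on which A raises IndexError.
def Pre_find_top2_clusters (clusters : List Int) : Prop :=
  2 ≤ (PySem.Set.ofList (clusters.filter (fun c => !(c == -1)))).length
instance (clusters : List Int) : Decidable (Pre_find_top2_clusters clusters) := by unfold Pre_find_top2_clusters; infer_instance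

def pvWitness_find_top2_clusters : List Int := [0, 1, 0, -1, 1, 0]

def Spec_find_top2_clusters (clusters : List Int) (out : List Int × List Int) : Prop := out = find_top2_clusters_alt clusters
instance (clusters : List Int) (out : List Int × List Int) : Decidable (Spec_find_top2_clusters clusters out) := by unfold Spec_find_top2_clusters; infer_instance

-- ===== CLAIM (what is proved, stated in full; the proofs are below) =====
def Claim_equal_find_top2_clusters : Prop := ∀ (clusters : List Int), Dom_find_top2_clusters clusters → Pre_find_top2_clusters clusters → Spec_find_top2_clusters clusters (find_top2_clusters clusters)

-- ===== LEMMAS AND PROOFS =====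

-- Inserting a fresh key via setdefault-then-overwrite is the same as a plain insert.
theorem pv_setdefault_insert {d : PySem.Dict Int (List Int)} {k : Int} (v w : List Int)
    (h : d.contains k = false) : (d.setdefault k v).insert k w = d.insert k w := by
  have hall : ∀ p ∈ d.items, (p.1 == k) = false := by
    intro p hp
    have hne := List.any_eq_false.mp h
    simpa using hne p hp
  have hmap : d.items.map (fun p => if (p.1 == k) = true then (k, w) else p) = d.items := by
    calc d.items.map (fun p => if (p.1 == k) = true then (k, w) else p)
        = d.items.map id := List.map_congr_left (fun p hp => by simp [hall p hp])
      _ = d.items := List.map_id _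
  have hns : ¬ (d.contains k = true) := by simp [h]
  have hps : PySem.Dict.contains ⟨d.items ++ [(k, v)]⟩ k = true := by
    simp [PySem.Dict.contains]
  apply PySem.Dict.ext
  rw [PySem.Dict.setdefault, if_neg hns]
  rw [PySem.Dict.insert, PySem.Dict.insert, if_pos hps, if_neg hns]
  show (List.map _ (d.items ++ [(k, v)]) : List (Int × List Int)) = d.items ++ [(k, w)]
  rw [List.map_append, hmap]
  simp

-- The two grouping-loop bodies agree on every dict and every (index, label) pair.
theorem pv_step_eq (d : PySem.Dict Int (List Int)) (p : Int × Int) :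
    (if p.2 != -1 then (d.setdefault p.2 []).modify p.2 [] (fun l => l ++ [p.1]) else d)
      = (if p.2 == -1 then d
         else if d.contains p.2 then d.modify p.2 [] (fun l => l ++ [p.1])
         else d.insert p.2 [p.1]) := by
  by_cases h : p.2 = -1
  · simp [h]
  · have hne : (p.2 == -1) = false := by simpa using h
    simp only [hne, bne, Bool.not_false, if_true, Bool.false_eq_true, if_false]
    by_cases hc : d.contains p.2
    · rw [PySem.Dict.setdefault_of_contains d [] hc, if_pos hc]
    · have hc' : d.contains p.2 = false := by simpa using hc
      rw [if_neg hc, PySem.Dict.modify, PySem.Dict.getD_setdefault_self,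
          PySem.Dict.getD_of_not_contains d [] hc', List.nil_append,
          pv_setdefault_insert [] [p.1] hc']

theorem pv_groups_eq (clusters : List Int) : pvB_groups clusters = pvA_dic clusters := by
  unfold pvB_groups pvA_dic
  exact List.foldl_ext _ _ _ (fun d p _ => pv_step_eq d p)

theorem pv_keys_contains (d : PySem.Dict Int (List Int)) (k : Int) :
    PySem.Set.contains d.keys k = d.contains k := by
  show (d.items.map (·.1)).contains k = d.items.any (·.1 == k)
  induction d.items with
  | nil => rfl
  | cons a t ih => simp_all [BEq.comm]

-- The keys of A's dict are the distinct labels ≠ -1 in first-appearance order.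
theorem pv_keys_fold (l : List (Int × Int)) (d : PySem.Dict Int (List Int)) :
    (l.foldl (fun d p =>
      if p.2 == -1 then d
      else if d.contains p.2 then d.modify p.2 [] (fun l => l ++ [p.1])
      else d.insert p.2 [p.1]) d).keys
    = PySem.Set.update d.keys ((l.map (·.2)).filter (fun c => !(c == -1))) := by
  induction l generalizing d with
  | nil => simp [PySem.Set.update]
  | cons p t ih =>
    rw [List.foldl_cons, List.map_cons, List.filter_cons]
    by_cases h : p.2 = -1
    · rw [if_pos (show (p.2 == -1) = true by simpa using h),
          if_neg (show ¬ ((!(p.2 == -1)) = true) by simp [h])]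
      exact ih d
    · have hb : (p.2 == -1) = false := by simpa using h
      rw [if_neg (show ¬ ((p.2 == -1) = true) by simp [hb]),
          if_pos (show (!(p.2 == -1)) = true by simp [hb])]
      by_cases hc : d.contains p.2
      · rw [if_pos hc, ih]
        have hk : (d.modify p.2 [] (fun l => l ++ [p.1])).keys = PySem.Set.add d.keys p.2 := by
          rw [PySem.Dict.keys_modify, PySem.Dict.keys_insert_of_contains _ _ hc,
              PySem.Set.add, if_pos (by rw [pv_keys_contains]; exact hc)]
        rw [hk]
        rfl
      · have hc' : d.contains p.2 = false := by simpa using hc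
        rw [if_neg hc, ih]
        have hk : (d.insert p.2 [p.1]).keys = PySem.Set.add d.keys p.2 := by
          rw [PySem.Dict.keys_insert_of_not_contains _ _ hc',
              PySem.Set.add, if_neg (by rw [pv_keys_contains, hc']; simp)]
        rw [hk]
        rfl

-- Under Pre_, A's dict has at least two entries.
theorem pv_items_len (clusters : List Int) (h : Pre_find_top2_clusters clusters) :
    2 ≤ (pvA_dic clusters).items.length := by
  have hk : (pvA_dic clusters).keys
      = PySem.Set.ofList (clusters.filter (fun c => !(c == -1))) := by
    unfold pvA_dic
    rw [pv_keys_fold]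
    have hm : (PySem.List.enumerate clusters 0).map (·.2) = clusters :=
      PySem.List.map_snd_enumerate clusters 0
    rw [hm]
    rfl
  have hlen : (pvA_dic clusters).keys.length = (pvA_dic clusters).items.length := by
    simp [PySem.Dict.keys]
  rw [← hlen, hk]
  exact h

-- One insertion step of A's descending stable sort agrees with B's top-2 update on the first two slots.
theorem pv_take2_insertBy (x : Int × List Int) (acc : List (Int × List Int)) :
    (PySem.List.insertBy (fun a b => decide (b.2.length < a.2.length)) x acc).take 2
      = pvB_step (acc.take 2) x := by
  match acc with
  | [] => simp [PySem.List.insertBy, pvB_step]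
  | [a] =>
    by_cases h : a.2.length < x.2.length <;>
      simp [PySem.List.insertBy, pvB_step, h, gt_iff_lt]
  | a :: b :: t =>
    by_cases h1 : a.2.length < x.2.length
    · simp [PySem.List.insertBy, pvB_step, h1, gt_iff_lt]
    · by_cases h2 : b.2.length < x.2.length <;>
        simp [PySem.List.insertBy, pvB_step, h1, h2, gt_iff_lt]

theorem pv_take2_fold (l : List (Int × List Int)) (acc : List (Int × List Int)) :
    (l.foldl (fun acc x => PySem.List.insertBy (fun a b => decide (b.2.length < a.2.length)) x acc) acc).take 2
      = l.foldl pvB_step (acc.take 2) := by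
  induction l generalizing acc with
  | nil => rfl
  | cons x t ih => rw [List.foldl_cons, List.foldl_cons, ih, pv_take2_insertBy]

theorem pv_get0 (p q : Int × List Int) (rest : List (Int × List Int)) :
    PySem.List.pyGet? (p :: q :: rest) 0 = some p := by
  simp [PySem.List.pyGet?, PySem.List.pyIdx?]
  have h : (0:Int) ≤ (rest.length:Int) + 1 := by positivity
  simp [h]

theorem pv_get1 (p q : Int × List Int) (rest : List (Int × List Int)) :
    PySem.List.pyGet? (p :: q :: rest) 1 = some q := by
  simp [PySem.List.pyGet?, PySem.List.pyIdx?]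

-- ===== VERDICT (by name: the statement is the Claim_ definition above) =====
theorem find_top2_clusters_spec : Claim_equal_find_top2_clusters := by
  intro clusters _ hpre
  unfold Spec_find_top2_clusters
  unfold find_top2_clusters find_top2_clusters_alt
  rw [pv_groups_eq]
  have hsort : PySem.List.sorted (pvA_dic clusters).items (fun x => x.2.length) true
      = (pvA_dic clusters).items.foldl
          (fun acc x => PySem.List.insertBy (fun a b => decide (b.2.length < a.2.length)) x acc) [] := by
    simpa using PySem.List.sorted_rev_eq_foldl_insertBy (pvA_dic clusters).items (fun x => x.2.length)
  have hlen : 2 ≤ (PySem.List.sorted (pvA_dic clusters).items (fun x => x.2.length) true).length := by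
    rw [PySem.List.length_sorted]
    exact pv_items_len clusters hpre
  obtain ⟨p, q, rest, hs⟩ : ∃ p q rest,
      PySem.List.sorted (pvA_dic clusters).items (fun x => x.2.length) true = p :: q :: rest := by
    match hm : PySem.List.sorted (pvA_dic clusters).items (fun x => x.2.length) true with
    | [] => rw [hm] at hlen; simp at hlen
    | [a] => rw [hm] at hlen; simp at hlen
    | p :: q :: rest => exact ⟨p, q, rest, rfl⟩
  have htop : (pvA_dic clusters).items.foldl pvB_step [] = [p, q] := by
    have h2 := pv_take2_fold (pvA_dic clusters).items []
    rw [← hsort, hs] at h2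
    simpa using h2.symm
  rw [hs, htop]
  simp only [pv_get0, pv_get1, Option.getD_some]
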